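-- pv_equiv track=rewrite | github.com/0choki0/algo | 프로그래머스/3/12987. 숫자 게임/숫자 게임.py | solution
-- ===== SOURCE A (Python) =====
-- def solution(A, B):
--     point = 0
--
--     A.sort()
--     B.sort()
--
--     a, b = 0, 0
--     while a != len(A) and b != len(B):
--         if B[b] > A[a]:
--             point += 1
--             a += 1
--             b += 1
--         else:
--             b += 1
--
--     return point
-- ===== SOURCE B (Python) =====
-- def solution(A, B):
--     # Hall-style greedy with binary search: taking B in ascending order, b earns
--     # a match iff the number of A values strictly below b exceeds the matches
--     # made so far.  A is consulted only through a sorted copy and binary search;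
--     # there is no pointer walking A.  Unlike A, this does not sort A or B in
--     # place; the equivalence is about the return value.
--     A_sorted = sorted(A)
--     matched = 0
--     for b in sorted(B):
--         lo, hi = 0, len(A_sorted)
--         while lo < hi:  # hand-written bisect_left(A_sorted, b)
--             mid = (lo + hi) // 2
--             if A_sorted[mid] < b:
--                 lo = mid + 1
--             else:
--                 hi = mid
--         if matched < lo:
--             matched += 1
--     return matched
-- ===== Notes on version B (the rewrite author's own statement) =====
-- stated objective: alternative
-- what changed: Replaces A's two-pointer greedy walk of both sorted lists with a Hall-style greedy: a single pass over sorted B where each b earns a match iff matches-so-far is below the count of A values smaller than b, that count obtained by a hand-written binary search on a sorted copy of A (no pointer into A); B does not mutate its arguments, the equivalence is about the return value.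
import Mathlib
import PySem

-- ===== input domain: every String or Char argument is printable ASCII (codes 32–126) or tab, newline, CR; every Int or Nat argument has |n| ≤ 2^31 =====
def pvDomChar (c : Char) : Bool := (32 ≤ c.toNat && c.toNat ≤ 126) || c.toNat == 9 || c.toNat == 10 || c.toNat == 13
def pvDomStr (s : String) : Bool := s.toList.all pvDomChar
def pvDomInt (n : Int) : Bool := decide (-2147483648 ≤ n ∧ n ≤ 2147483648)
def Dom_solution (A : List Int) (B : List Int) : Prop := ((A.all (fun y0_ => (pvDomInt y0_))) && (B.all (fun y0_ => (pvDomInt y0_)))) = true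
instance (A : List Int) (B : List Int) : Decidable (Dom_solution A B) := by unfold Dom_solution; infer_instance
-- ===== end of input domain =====

-- B replaces A's two-pointer greedy with a Hall-style greedy over sorted B plus a
-- binary search into a sorted copy of A (alternative, same cost); unlike A it does
-- not sort its arguments in place — the equivalence proved is about the return value.

-- ===== PORT A =====
-- A's while loop over indices a,b into the two ascending-sorted lists, transliterated
-- as the structural recursion that consumes the heads (advancing an index = dropping a
-- head); branch order and comparisons are A's.
def fGo : List Int → List Int → Int
  | [], _ => 0
  | _, [] => 0
  | a :: as, b :: bs => if b > a then 1 + fGo as bs else fGo (a :: as) bs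

def solution (A : List Int) (B : List Int) : Int :=
  fGo (PySem.List.sorted A (fun x => x) false) (PySem.List.sorted B (fun x => x) false)

-- ===== PORT B =====
-- Source B's hand-written 'while lo < hi' binary search (bisect_left); the index mid is
-- always in range (0 ≤ lo ≤ mid < hi ≤ len), so pyGetD with default 0 is exact.
-- fuel = the interval width at entry; the loop shrinks hi-lo by at least 1 each
-- iteration, so the fuel is never exhausted before lo = hi (proved in bLoop_eq_countLt).
def bLoop (xs : List Int) (b : Int) : Nat → Int → Int → Int
  | 0, lo, _ => lo
  | n + 1, lo, hi =>
    if lo < hi then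
      let mid := PySem.Int.floordiv (lo + hi) 2
      if PySem.List.pyGetD xs mid 0 < b then bLoop xs b n (mid + 1) hi
      else bLoop xs b n lo mid
    else lo

-- Source B's for-loop over sorted(B) with the accumulator 'matched'.
def solution_alt (A : List Int) (B : List Int) : Int :=
  let As := PySem.List.sorted A (fun x => x) false
  (PySem.List.sorted B (fun x => x) false).foldl
    (fun matched b =>
      if matched < bLoop As b As.length 0 (As.length : Int) then matched + 1 else matched) 0

-- ===== PRECONDITION & SPEC =====
def Spec_solution (A : List Int) (B : List Int) (out : Int) : Prop := out = solution_alt A B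
instance (A : List Int) (B : List Int) (out : Int) : Decidable (Spec_solution A B out) := by unfold Spec_solution; infer_instance

-- ===== CLAIM =====
def Claim_equal_solution : Prop := ∀ (A : List Int) (B : List Int), Dom_solution A B → Spec_solution A B (solution A B)

-- ===== LEMMAS AND PROOFS =====

-- number of A-values strictly below b, as an Int
def countLt (xs : List Int) (b : Int) : Int :=
  ((xs.filter (fun a => a < b)).length : Int)

-- a list whose elements satisfy p exactly on the first k positions has filter-length k
theorem filter_length_split (p : Int → Bool) :
    ∀ (xs : List Int) (k : Nat), k ≤ xs.length →
      (∀ i (h : i < xs.length), i < k → p xs[i] = true) →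
      (∀ i (h : i < xs.length), k ≤ i → p xs[i] = false) →
      (xs.filter p).length = k := by
  intro xs
  induction xs with
  | nil =>
    intro k hk _ _
    have hk0 : k = 0 := Nat.le_antisymm (by simpa using hk) (Nat.zero_le _)
    simp [hk0]
  | cons x t ih =>
    intro k hk hlo hhi
    cases k with
    | zero =>
      have hx : p x = false := hhi 0 (by simp) (Nat.zero_le _)
      have ht : (t.filter p).length = 0 :=
        ih 0 (Nat.zero_le _) (by omega)
          (fun i h _ => by simpa using hhi (i + 1) (by simpa using Nat.succ_lt_succ h) (Nat.zero_le _))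
      simp [hx, ht]
    | succ k' =>
      have hx : p x = true := hlo 0 (by simp) (Nat.succ_pos _)
      have ht : (t.filter p).length = k' :=
        ih k' (by simpa using hk)
          (fun i h hik => by
            simpa using hlo (i + 1) (by simpa using Nat.succ_lt_succ h) (by omega))
          (fun i h hki => by
            simpa using hhi (i + 1) (by simpa using Nat.succ_lt_succ h) (by omega))
      simp [hx, ht]

-- binary-search invariant: on a sorted list, with enough fuel, bLoop computes countLt
theorem bLoop_eq_countLt (xs : List Int) (hs : xs.Pairwise (· ≤ ·)) (b : Int) :
    ∀ (n : Nat) (lo hi : Int), (hi - lo).toNat ≤ n →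
      0 ≤ lo → lo ≤ hi → hi ≤ (xs.length : Int) →
      (∀ i (h : i < xs.length), (i : Int) < lo → xs[i] < b) →
      (∀ i (h : i < xs.length), hi ≤ (i : Int) → ¬ xs[i] < b) →
      bLoop xs b n lo hi = countLt xs b := by
  have hpair := List.pairwise_iff_getElem.mp hs
  have hdone : ∀ (lo : Int), 0 ≤ lo → lo ≤ (xs.length : Int) →
      (∀ i (h : i < xs.length), (i : Int) < lo → xs[i] < b) →
      (∀ i (h : i < xs.length), lo ≤ (i : Int) → ¬ xs[i] < b) →
      lo = countLt xs b := by
    intro lo h0 hl hbelow habove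
    have hk : lo.toNat ≤ xs.length := by omega
    have := filter_length_split (fun a => decide (a < b)) xs lo.toNat hk
      (fun i h hik => by simpa using hbelow i h (by omega))
      (fun i h hki => by simpa using habove i h (by omega))
    unfold countLt
    rw [this]; omega
  intro n
  induction n with
  | zero =>
    intro lo hi hn h0 hlh hhl hbelow habove
    have hle : lo = hi := by omega
    subst hle
    exact hdone lo h0 hhl hbelow habove
  | succ n ih =>
    intro lo hi hn h0 hlh hhl hbelow habove
    by_cases hlt : lo < hi
    · have hmid : PySem.Int.floordiv (lo + hi) 2 = (lo + hi) / 2 :=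
        PySem.Int.floordiv_eq_ediv_of_pos (by omega)
      rw [bLoop, if_pos hlt,
        show (let mid := PySem.Int.floordiv (lo + hi) 2;
              if PySem.List.pyGetD xs mid 0 < b then bLoop xs b n (mid + 1) hi
              else bLoop xs b n lo mid)
            = (if PySem.List.pyGetD xs ((lo + hi) / 2) 0 < b then
                 bLoop xs b n ((lo + hi) / 2 + 1) hi
               else bLoop xs b n lo ((lo + hi) / 2)) from by simp only [hmid]]
      have hmrange : ((lo + hi) / 2).toNat < xs.length := by omega
      have hget : PySem.List.pyGetD xs ((lo + hi) / 2) 0 = xs[((lo + hi) / 2).toNat] :=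
        PySem.List.pyGetD_eq_getElem xs 0 (by omega) (by omega)
      by_cases hc : xs[((lo + hi) / 2).toNat] < b
      · rw [if_pos (by rw [hget]; exact hc)]
        refine ih ((lo + hi) / 2 + 1) hi (by omega) (by omega) (by omega) hhl ?_ habove
        intro i h hi'
        by_cases hcm : i < ((lo + hi) / 2).toNat
        · exact lt_of_le_of_lt (hpair i ((lo + hi) / 2).toNat h hmrange hcm) hc
        · have : i = ((lo + hi) / 2).toNat := by omega
          simpa [this] using hc
      · rw [if_neg (by rw [hget]; exact hc)]
        refine ih lo ((lo + hi) / 2) (by omega) h0 (by omega) (by omega) hbelow ?_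
        intro i h hi' hib
        by_cases hcm : ((lo + hi) / 2).toNat < i
        · exact hc (lt_of_le_of_lt (hpair ((lo + hi) / 2).toNat i hmrange h hcm) hib)
        · have : i = ((lo + hi) / 2).toNat := by omega
          exact hc (this ▸ hib)
    · rw [bLoop, if_neg hlt]
      have hle : lo = hi := le_antisymm hlh (le_of_not_gt hlt)
      subst hle
      exact hdone lo h0 hhl hbelow habove

-- the Hall-style fold over B equals A's greedy: 'matched' counts the consumed prefix of A
theorem fold_eq_fGo :
    ∀ (bs pre suf : List Int), (pre ++ suf).Pairwise (· ≤ ·) →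
      bs.foldl (fun m b => if m < countLt (pre ++ suf) b then m + 1 else m)
        (pre.length : Int) = (pre.length : Int) + fGo suf bs := by
  intro bs
  induction bs with
  | nil => intro pre suf _; cases suf <;> simp [fGo]
  | cons b bs ih =>
    intro pre suf hs
    cases suf with
    | nil =>
      have hcond : ¬ ((pre.length : Int) < countLt (pre ++ []) b) := by
        unfold countLt
        have := List.length_filter_le (fun a => decide (a < b)) (pre ++ [])
        simp only [List.append_nil] at this ⊢
        omega
      simp only [List.foldl_cons, if_neg hcond]
      simpa [fGo] using ih pre [] hs
    | cons a suf' =>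
      have hsplit := List.pairwise_append.mp hs
      have hprea : ∀ x ∈ pre, x ≤ a := fun x hx => hsplit.2.2 x hx a (by simp)
      have hasuf : ∀ y ∈ suf', a ≤ y :=
        fun y hy => (List.pairwise_cons.mp hsplit.2.1).1 y hy
      by_cases hba : b > a
      · -- match: the element at index pre.length (= a) is beaten
        have hcond : (pre.length : Int) < countLt (pre ++ a :: suf') b := by
          unfold countLt
          have hpre : pre.filter (fun x => decide (x < b)) = pre :=
            List.filter_eq_self.mpr (fun x hx => by
              simpa using lt_of_le_of_lt (hprea x hx) hba)
          rw [List.filter_append, hpre, List.filter_cons, if_pos (by simpa using hba)]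
          simp
        have hassoc : pre ++ a :: suf' = (pre ++ [a]) ++ suf' := by simp
        have ih' := ih (pre ++ [a]) suf' (by rw [← hassoc]; exact hs)
        simp only [List.foldl_cons, if_pos hcond]
        rw [show (pre.length : Int) + 1 = (((pre ++ [a]).length : Nat) : Int) by simp,
          show pre ++ a :: suf' = (pre ++ [a]) ++ suf' from hassoc, ih']
        simp [fGo, hba, add_assoc]
      · -- skip b: no A value beyond the consumed prefix is below b
        have hcond : ¬ ((pre.length : Int) < countLt (pre ++ a :: suf') b) := by
          unfold countLt
          have hsufnil : (a :: suf').filter (fun x => decide (x < b)) = [] := by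
            rw [List.filter_eq_nil_iff]
            intro y hy
            rcases List.mem_cons.mp hy with rfl | hy'
            · simpa using not_lt.mpr (le_of_not_gt hba)
            · simpa using not_lt.mpr (le_trans (le_of_not_gt hba) (hasuf y hy'))
          rw [List.filter_append, hsufnil]
          have := List.length_filter_le (fun x => decide (x < b)) pre
          simp; omega
        simp only [List.foldl_cons, if_neg hcond]
        rw [ih pre (a :: suf') hs]
        simp [fGo, hba]

-- pointwise-equal fold functions give equal folds
theorem foldl_funext {α β : Type} (f g : β → α → β) (h : ∀ m b, f m b = g m b) :
    ∀ (bs : List α) (m : β), bs.foldl f m = bs.foldl g m := by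
  intro bs
  induction bs with
  | nil => intro m; rfl
  | cons b bs ih => intro m; simp only [List.foldl_cons, h m b, ih]

-- ===== VERDICT =====
theorem solution_spec : Claim_equal_solution := by
  intro A B _
  unfold Spec_solution solution solution_alt
  set As := PySem.List.sorted A (fun x => x) false with hAs
  set Bs := PySem.List.sorted B (fun x => x) false with hBs
  have hsorted : As.Pairwise (· ≤ ·) := by
    simpa using PySem.List.sorted_pairwise A (fun x => x)
  have hbl : ∀ (m b : Int),
      (if m < bLoop As b As.length 0 (As.length : Int) then m + 1 else m)
        = (if m < countLt ([] ++ As) b then m + 1 else m) := by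
    intro m b
    rw [bLoop_eq_countLt As hsorted b As.length 0 (As.length : Int)
      (by omega) le_rfl (by omega) le_rfl (by omega) (by omega)]
    simp
  rw [foldl_funext _ _ hbl Bs 0,
    show (0 : Int) = (([] : List Int).length : Int) by simp,
    fold_eq_fGo Bs [] As (by simpa using hsorted)]
  simp
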